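-- pv_equiv track=rewrite | github.com/cuzic/ai-dev-yodoq | assets/templates/svg_templates/update_markdown.py | extract_slides_with_positions
-- ===== SOURCE A (Python) =====
-- def extract_slides_with_positions(md_content):
--     """
--     Extract slides with their start/end positions in the file.
--
--     Returns: List of (slide_index, start_pos, end_pos, slide_content) tuples
--     """
--     slides = []
--     lines = md_content.split('\n')
--     current_slide_lines = []
--     current_slide_start = 0
--     slide_index = 0
--
--     for i, line in enumerate(lines):
--         if line.strip() == '---':
--             if current_slide_lines:
--                 slides.append((
--                     slide_index,
--                     current_slide_start,
--                     i,
--                     '\n'.join(current_slide_lines)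
--                 ))
--                 slide_index += 1
--             current_slide_lines = []
--             current_slide_start = i + 1
--         else:
--             current_slide_lines.append(line)
--
--     # Add last slide
--     if current_slide_lines:
--         slides.append((
--             slide_index,
--             current_slide_start,
--             len(lines),
--             '\n'.join(current_slide_lines)
--         ))
--
--     return slides
-- ===== SOURCE B (Python) =====
-- def extract_slides_with_positions(md_content):
--     """
--     Extract slides with their start/end positions in the file.
--
--     Returns: List of (slide_index, start_pos, end_pos, slide_content) tuples
--     """
--     lines = md_content.split('\n')
--     bounds = [-1] + [i for i, line in enumerate(lines) if line.strip() == '---'] + [len(lines)]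
--     slides = []
--     idx = 0
--     for p, q in zip(bounds, bounds[1:]):
--         seg = lines[p + 1:q]
--         if seg:
--             slides.append((idx, p + 1, q, '\n'.join(seg)))
--             idx += 1
--     return slides
-- ===== Notes on version B (the rewrite author's own statement) =====
-- stated objective: alternative
-- what changed: B replaces A's single-pass incremental accumulator (current slide lines, start position, flush on each delimiter plus a trailing flush) by first collecting all delimiter line indices into a boundary table (-1, the delimiter indices, len(lines)) and then emitting one slide per consecutive boundary pair via list slicing, skipping empty segments.
import Mathlib
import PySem

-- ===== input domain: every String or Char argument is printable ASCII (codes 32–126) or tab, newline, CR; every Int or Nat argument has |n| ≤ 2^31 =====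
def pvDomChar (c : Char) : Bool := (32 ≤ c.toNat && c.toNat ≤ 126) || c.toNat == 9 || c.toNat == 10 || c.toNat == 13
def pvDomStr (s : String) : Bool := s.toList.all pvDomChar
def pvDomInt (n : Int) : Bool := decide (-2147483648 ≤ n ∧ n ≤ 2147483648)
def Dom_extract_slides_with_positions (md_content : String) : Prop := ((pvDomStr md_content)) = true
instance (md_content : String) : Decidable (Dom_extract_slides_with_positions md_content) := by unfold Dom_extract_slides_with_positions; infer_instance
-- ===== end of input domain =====

-- B replaces A's incremental slide accumulator by a precomputed delimiter-boundary table
-- scanned pairwise with slices (different decomposition of the same work; objective: alternative).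


-- md_content.split('\n'); the separator "\n" is a nonempty literal, so split? is always `some`
-- and the getD default is never used (exact).
def pvLines (md_content : String) : List String := (PySem.Str.split? md_content "\n").getD []

-- ===== PORT A =====
-- loop body; state: (slides, current_slide_lines, current_slide_start, slide_index)
def pvStepA (st : List (Int × Int × Int × String) × List String × Int × Int)
    (p : Int × String) : List (Int × Int × Int × String) × List String × Int × Int :=
  let (slides, cur, start, idx) := st
  if PySem.Str.strip p.2 == "---" then
    if cur ≠ [] then
      (slides ++ [(idx, start, p.1, PySem.Str.join "\n" cur)], [], p.1 + 1, idx + 1)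
    else
      (slides, [], p.1 + 1, idx)
  else
    (slides, cur ++ [p.2], start, idx)

-- the trailing "Add last slide" flush
def pvFinA (lines : List String) (st : List (Int × Int × Int × String) × List String × Int × Int) :
    List (Int × Int × Int × String) :=
  let (slides, cur, start, idx) := st
  if cur ≠ [] then
    slides ++ [(idx, start, (lines.length : Int), PySem.Str.join "\n" cur)]
  else slides

def extract_slides_with_positions (md_content : String) : List (Int × Int × Int × String) :=
  pvFinA (pvLines md_content)
    ((PySem.List.enumerate (pvLines md_content) 0).foldl pvStepA ([], [], 0, 0))

-- ===== PORT B =====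
-- bounds = [-1] + [i for i, line in enumerate(lines) if line.strip() == '---'] + [len(lines)]
def pvBounds (lines : List String) : List Int :=
  [-1] ++ ((PySem.List.enumerate lines 0).filter
      (fun p => PySem.Str.strip p.2 == "---")).map (·.1) ++ [(lines.length : Int)]

-- loop body over a boundary pair; state: (slides, idx)
def pvStepB (lines : List String) (st : List (Int × Int × Int × String) × Int)
    (pq : Int × Int) : List (Int × Int × Int × String) × Int :=
  let seg := PySem.List.slice lines (some (pq.1 + 1)) (some pq.2)
  if seg ≠ [] then
    (st.1 ++ [(st.2, pq.1 + 1, pq.2, PySem.Str.join "\n" seg)], st.2 + 1)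
  else
    st

def extract_slides_with_positions_alt (md_content : String) : List (Int × Int × Int × String) :=
  (((pvBounds (pvLines md_content)).zip (pvBounds (pvLines md_content)).tail).foldl
      (pvStepB (pvLines md_content)) ([], 0)).1

-- ===== PRECONDITION & SPEC =====
def Spec_extract_slides_with_positions (md_content : String) (out : List (Int × Int × Int × String)) : Prop := out = extract_slides_with_positions_alt md_content
instance (md_content : String) (out : List (Int × Int × Int × String)) : Decidable (Spec_extract_slides_with_positions md_content out) := by unfold Spec_extract_slides_with_positions; infer_instance

-- ===== CLAIM (what is proved, stated in full; the proofs are below) =====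
def Claim_equal_extract_slides_with_positions : Prop := ∀ (md_content : String), Dom_extract_slides_with_positions md_content → Spec_extract_slides_with_positions md_content (extract_slides_with_positions md_content)

-- ===== LEMMAS AND PROOFS =====

-- recursive characterisation of A's loop + trailing flush
def pvRunA (lines : List String) : List String → Int → List String → Int → Int → List (Int × Int × Int × String)
  | [], _, cur, start, idx =>
      if cur ≠ [] then [(idx, start, (lines.length : Int), PySem.Str.join "\n" cur)] else []
  | l :: ls, i, cur, start, idx =>
      if PySem.Str.strip l == "---" then
        if cur ≠ [] then
          (idx, start, i, PySem.Str.join "\n" cur) :: pvRunA lines ls (i + 1) [] (i + 1) (idx + 1)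
        else
          pvRunA lines ls (i + 1) [] (i + 1) idx
      else
        pvRunA lines ls (i + 1) (cur ++ [l]) start idx

-- recursive characterisation of B's pairwise boundary fold
def pvRunB (lines : List String) : List Int → Int → List (Int × Int × Int × String)
  | b :: b' :: rest, idx =>
      let seg := PySem.List.slice lines (some (b + 1)) (some b')
      if seg ≠ [] then
        (idx, b + 1, b', PySem.Str.join "\n" seg) :: pvRunB lines (b' :: rest) (idx + 1)
      else
        pvRunB lines (b' :: rest) idx
  | _, _ => []

theorem pvFoldA_eq_runA (lines : List String) :
    ∀ (rest : List String) (i : Int) (slides : List (Int × Int × Int × String))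
      (cur : List String) (start idx : Int),
      pvFinA lines ((PySem.List.enumerate rest i).foldl pvStepA (slides, cur, start, idx))
      = slides ++ pvRunA lines rest i cur start idx := by
  intro rest
  induction rest with
  | nil =>
      intro i slides cur start idx
      simp only [PySem.List.enumerate_nil, List.foldl_nil, pvRunA, pvFinA]
      split <;> simp
  | cons l ls ih =>
      intro i slides cur start idx
      simp only [PySem.List.enumerate_cons, List.foldl_cons, pvRunA]
      by_cases h1 : (PySem.Str.strip l == "---") = true
      · by_cases h2 : cur ≠ []
        · simp [pvStepA, h1, h2, ih]
        · simp [pvStepA, h1, h2, ih]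
      · simp [pvStepA, h1, ih]

theorem pvFoldB_eq_runB (lines : List String) :
    ∀ (bounds : List Int) (out : List (Int × Int × Int × String)) (idx : Int),
      ((bounds.zip bounds.tail).foldl (pvStepB lines) (out, idx)).1
      = out ++ pvRunB lines bounds idx := by
  intro bounds
  induction bounds with
  | nil => intro out idx; simp [pvRunB]
  | cons b rest ih =>
      intro out idx
      cases rest with
      | nil => simp [pvRunB]
      | cons b' rest' =>
          simp only [List.tail_cons, List.zip_cons_cons, List.foldl_cons, pvRunB] at ih ⊢
          by_cases h : PySem.List.slice lines (some (b + 1)) (some b') ≠ []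
          · simp [pvStepB, h, ih]
          · simp [pvStepB, h, ih]

theorem pvRunB_cons_cons (lines : List String) (b b' : Int) (rest : List Int) (idx : Int) :
    pvRunB lines (b :: b' :: rest) idx =
      (if PySem.List.slice lines (some (b + 1)) (some b') ≠ [] then
        (idx, b + 1, b', PySem.Str.join "\n" (PySem.List.slice lines (some (b + 1)) (some b')))
          :: pvRunB lines (b' :: rest) (idx + 1)
      else pvRunB lines (b' :: rest) idx) := rfl

theorem pvRunB_single (lines : List String) (b : Int) (idx : Int) :
    pvRunB lines [b] idx = [] := rfl

theorem pvRunA_eq_runB (lines : List String) :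
    ∀ (rest : List String) (i start : Nat) (idx : Int),
      lines.drop i = rest → start ≤ i →
      pvRunA lines rest (i : Int) ((lines.drop start).take (i - start)) (start : Int) idx
      = pvRunB lines (((start : Int) - 1) ::
          ((PySem.List.enumerate rest (i : Int)).filter
            (fun p => PySem.Str.strip p.2 == "---")).map (·.1) ++ [(lines.length : Int)]) idx := by
  intro rest
  induction rest with
  | nil =>
      intro i start idx hdrop hle
      have hlen : lines.length ≤ i := by
        have := congrArg List.length hdrop
        simp at this; omega
      have hcur : (lines.drop start).take (i - start) = lines.drop start := by
        apply List.take_of_length_le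
        simp; omega
      have hseg : (lines.drop start).take (lines.length - start) = lines.drop start := by
        apply List.take_of_length_le; simp
      have hb : ((start : Int) - 1 + 1) = (start : Int) := by ring
      simp only [PySem.List.enumerate_nil, List.filter_nil, List.map_nil, pvRunA, hcur]
      rw [List.singleton_append, pvRunB_cons_cons, hb, PySem.List.slice_natCast, hseg]
      split <;> simp [pvRunB_single]
  | cons l ls ih =>
      intro i start idx hdrop hle
      have hdrop' : lines.drop (i + 1) = ls := by
        have h := congrArg (List.drop 1) hdrop
        simp only [List.drop_drop, List.drop_one, List.tail_cons] at h
        simpa [Nat.add_comm] using h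
      have hb : ((start : Int) - 1 + 1) = (start : Int) := by ring
      have hcast : ((i : Int) + 1) = ((i + 1 : Nat) : Int) := by push_cast; ring
      by_cases h1 : (PySem.Str.strip l == "---") = true
      · -- delimiter line at index i
        have hIH := ih (i + 1) (i + 1) (idx + 1) hdrop' (le_refl _)
        have hIH0 := ih (i + 1) (i + 1) idx hdrop' (le_refl _)
        simp only [Nat.sub_self, List.take_zero] at hIH hIH0
        have hb' : (((i + 1 : Nat) : Int) - 1) = (i : Int) := by push_cast; ring
        rw [hb'] at hIH hIH0
        simp only [PySem.List.enumerate_cons, List.filter_cons, h1, if_true, List.map_cons,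
          List.cons_append]
        rw [pvRunB_cons_cons, hb, PySem.List.slice_natCast]
        simp only [pvRunA, h1, if_true]
        by_cases h2 : (lines.drop start).take (i - start) ≠ []
        · rw [if_pos h2, if_pos h2, hcast, hIH]; simp
        · rw [if_neg h2, if_neg h2, hcast, hIH0]; simp
      · -- ordinary line at index i
        have hget : (lines.drop start)[i - start]? = some l := by
          rw [List.getElem?_drop]
          have hss : start + (i - start) = i := by omega
          rw [hss, ← List.head?_drop, hdrop]; rfl
        have hcur : (lines.drop start).take (i - start) ++ [l]
            = (lines.drop start).take (i + 1 - start) := by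
          have hs1 : i + 1 - start = (i - start) + 1 := by omega
          rw [hs1, List.take_add_one, hget]
          simp
        simp only [PySem.List.enumerate_cons, List.filter_cons, pvRunA, h1, if_false,
          Bool.false_eq_true]
        rw [hcur, hcast, ih (i + 1) start idx hdrop' (by omega)]

-- ===== VERDICT (by name: the statement is the Claim_ definition above) =====
theorem extract_slides_with_positions_spec : Claim_equal_extract_slides_with_positions := by
  intro md _
  unfold Spec_extract_slides_with_positions
  unfold extract_slides_with_positions extract_slides_with_positions_alt
  generalize pvLines md = lines
  rw [pvFoldB_eq_runB, pvFoldA_eq_runA]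
  have hmain := pvRunA_eq_runB lines lines 0 0 0 (by simp) (le_refl _)
  simp only [Nat.cast_zero, Nat.sub_zero, List.drop_zero, List.take_zero] at hmain
  rw [hmain]
  unfold pvBounds
  norm_num
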